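-- pv_equiv track=rewrite | github.com/Yaroslav0056/Algorithm_2 | lab_2/board.py | min_board_size
-- ===== SOURCE A (Python) =====
-- def min_board_size(N, W, H):
--     left = max(W, H)
--     right = max(W, H) * N
--
--     while left < right:
--         mid = (left + right) // 2
--         rows = mid // W
--         cols = mid // H
--
--         if rows * cols >= N:
--             right = mid
--         else:
--             left = mid + 1
--
--     return left
-- ===== SOURCE B (Python) =====
-- def min_board_size(N, W, H):
--     # Enumerate tile-grid shapes instead of binary-searching the side:
--     # a minimal side is max(r*W, c*H) for some r*c >= N with min(r, c) <= ceil(sqrt(N)),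
--     # so trying r = 1..K (K = least integer with K*K >= N) in both roles suffices.
--     if N <= 1:
--         return max(W, H)
--     K = 1
--     while K * K < N:
--         K += 1
--     best = N * max(W, H)
--     for r in range(1, K + 1):
--         c = -(-N // r)  # ceil(N / r)
--         best = min(best, max(r * W, c * H), max(c * W, r * H))
--     return best
-- ===== Notes on version B (the rewrite author's own statement) =====
-- stated objective: alternative
-- what changed: Replaces the binary search over the board side with a direct enumeration of tile-grid shapes: for r = 1..ceil(sqrt(N)) (in both the rows and the columns role) the minimal side for an r x ceil(N/r) grid is max(r*W, ceil(N/r)*H), and B returns the minimum of these candidates.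
-- outside the precondition, e.g. on min_board_size(5, -2, 3): A returns 15, B returns 3; on min_board_size(5, 0, 3): A raises ZeroDivisionError, B returns 3
import Mathlib
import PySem

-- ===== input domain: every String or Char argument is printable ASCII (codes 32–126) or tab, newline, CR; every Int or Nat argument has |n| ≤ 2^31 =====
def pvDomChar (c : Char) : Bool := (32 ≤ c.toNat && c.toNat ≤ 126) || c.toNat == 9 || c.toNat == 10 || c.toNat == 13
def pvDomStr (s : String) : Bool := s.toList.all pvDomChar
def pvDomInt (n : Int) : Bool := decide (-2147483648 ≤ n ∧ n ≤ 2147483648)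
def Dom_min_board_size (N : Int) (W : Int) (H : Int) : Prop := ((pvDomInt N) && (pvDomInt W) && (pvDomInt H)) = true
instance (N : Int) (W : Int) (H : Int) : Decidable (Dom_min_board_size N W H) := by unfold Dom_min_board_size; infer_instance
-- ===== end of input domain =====

-- B replaces A's binary search on the side length by an enumeration of tile-grid shapes
-- (r rows for r = 1..ceil(sqrt(N)), each in both roles); alternative algorithm, not claimed faster.

-- ===== PORT A =====
-- the while-loop of A, step for step (left/right are the loop state)
def pvAloop (N W H : Int) (left right : Int) : Int :=
  if left < right then
    let mid := PySem.Int.floordiv (left + right) 2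
    let rows := PySem.Int.floordiv mid W
    let cols := PySem.Int.floordiv mid H
    if N ≤ rows * cols then pvAloop N W H left mid
    else pvAloop N W H (mid + 1) right
  else left
termination_by (right - left).toNat
decreasing_by
  · have h2 : PySem.Int.floordiv (left + right) 2 < right := by
      have := (PySem.Int.floordiv_lt_iff_lt_mul (a := left + right) (b := 2) (q := right) (by norm_num))
      exact this.mpr (by omega)
    omega
  · have h1 : left ≤ PySem.Int.floordiv (left + right) 2 := by
      have := (PySem.Int.le_floordiv_iff_mul_le (a := left + right) (b := 2) (q := left) (by norm_num))
      exact this.mpr (by omega)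
    have h2 : PySem.Int.floordiv (left + right) 2 < right := by
      have := (PySem.Int.floordiv_lt_iff_lt_mul (a := left + right) (b := 2) (q := right) (by norm_num))
      exact this.mpr (by omega)
    omega

def min_board_size (N : Int) (W : Int) (H : Int) : Int :=
  pvAloop N W H (max W H) (max W H * N)

-- ===== PORT B =====
-- ceil(N / r), written in Source B as -(-N // r)
def pvCeil (N r : Int) : Int := -(PySem.Int.floordiv (-N) r)

-- the 'while K * K < N: K += 1' loop of Source B
def pvKloop (N K : Int) : Int :=
  if K * K < N then pvKloop N (K + 1) else K
termination_by (N - K).toNat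
decreasing_by
  have hKN : K < N := by rcases le_or_gt K 0 with h | h <;> nlinarith
  omega

def min_board_size_alt (N : Int) (W : Int) (H : Int) : Int :=
  if N ≤ 1 then max W H
  else
    let K := pvKloop N 1
    (PySem.List.pyRange 1 (K + 1) 1).foldl
      (fun best r =>
        min (min best (max (r * W) (pvCeil N r * H))) (max (pvCeil N r * W) (r * H)))
      (N * max W H)

-- ===== PRECONDITION & SPEC =====
-- Pre_ excludes inputs with a nonpositive tile dimension on which A's bisection loop can run
-- (i.e. unless N ≤ 1 with the other dimension positive, where the loop body is never entered):
-- there A raises ZeroDivisionError on a zero dimension, or floor-divides by a negative size and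
-- returns a meaningless value; B does the natural thing there.
def Pre_min_board_size (N : Int) (W : Int) (H : Int) : Prop :=
  (1 ≤ W ∧ 1 ≤ H) ∨ (N ≤ 1 ∧ (1 ≤ W ∨ 1 ≤ H))
instance (N : Int) (W : Int) (H : Int) : Decidable (Pre_min_board_size N W H) := by
  unfold Pre_min_board_size; infer_instance

def pvWitness_min_board_size : Int × Int × Int := (2, 2, 2)

def Spec_min_board_size (N : Int) (W : Int) (H : Int) (out : Int) : Prop := out = min_board_size_alt N W H
instance (N : Int) (W : Int) (H : Int) (out : Int) : Decidable (Spec_min_board_size N W H out) := by unfold Spec_min_board_size; infer_instance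

-- ===== CLAIM (what is proved, stated in full; the proofs are below) =====
def Claim_equal_min_board_size : Prop := ∀ (N : Int) (W : Int) (H : Int), Dom_min_board_size N W H → Pre_min_board_size N W H → Spec_min_board_size N W H (min_board_size N W H)

-- ===== LEMMAS AND PROOFS =====

-- the monotone predicate both programs search: a board of side S holds at least N tiles
def pvGood (N W H S : Int) : Prop :=
  N ≤ PySem.Int.floordiv S W * PySem.Int.floordiv S H

lemma pv_fdiv_ge {W a S : Int} (hW : 0 < W) (h : a * W ≤ S) :
    a ≤ PySem.Int.floordiv S W := by
  exact (PySem.Int.le_floordiv_iff_mul_le (a := S) (b := W) (q := a) hW).mpr h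

lemma pv_fdiv_mul_le {W : Int} (hW : 0 < W) (S : Int) :
    PySem.Int.floordiv S W * W ≤ S := by
  exact (PySem.Int.le_floordiv_iff_mul_le (a := S) (b := W) (q := PySem.Int.floordiv S W) hW).mp le_rfl

lemma pv_fdiv_nonneg {W S : Int} (hW : 0 < W) (hS : 0 ≤ S) :
    0 ≤ PySem.Int.floordiv S W := pv_fdiv_ge hW (by omega)

lemma pvGood_mono {N W H S T : Int} (hW : 0 < W) (hH : 0 < H) (hS : 0 ≤ S) (hST : S ≤ T) :
    pvGood N W H S → pvGood N W H T := by
  intro h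
  have hfw : PySem.Int.floordiv S W ≤ PySem.Int.floordiv T W :=
    pv_fdiv_ge hW ((pv_fdiv_mul_le hW S).trans hST)
  have hfh : PySem.Int.floordiv S H ≤ PySem.Int.floordiv T H :=
    pv_fdiv_ge hH ((pv_fdiv_mul_le hH S).trans hST)
  have h0w : 0 ≤ PySem.Int.floordiv S W := pv_fdiv_nonneg hW hS
  have h0h : 0 ≤ PySem.Int.floordiv S H := pv_fdiv_nonneg hH hS
  exact h.trans (mul_le_mul hfw hfh h0h (by omega))

lemma pvGood_candidate {N W H r c : Int} (hW : 0 < W) (hH : 0 < H)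
    (hr : 1 ≤ r) (hc : 1 ≤ c) (h : N ≤ r * c) :
    pvGood N W H (max (r * W) (c * H)) := by
  have h1 : r ≤ PySem.Int.floordiv (max (r * W) (c * H)) W :=
    pv_fdiv_ge hW (le_max_left _ _)
  have h2 : c ≤ PySem.Int.floordiv (max (r * W) (c * H)) H :=
    pv_fdiv_ge hH (le_max_right _ _)
  exact h.trans (mul_le_mul h1 h2 (by omega) (by omega))

lemma pv_fdiv_eq_zero {W T : Int} (hW : 0 < W) (h0 : 0 ≤ T) (h : T < W) :
    PySem.Int.floordiv T W = 0 := by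
  have h1 : PySem.Int.floordiv T W < 1 :=
    (PySem.Int.floordiv_lt_iff_lt_mul (a := T) (b := W) (q := 1) hW).mpr (by omega)
  have h2 : 0 ≤ PySem.Int.floordiv T W := pv_fdiv_nonneg hW h0
  omega

lemma pv_not_good_below {N W H T : Int} (hW : 0 < W) (hH : 0 < H) (hN : 1 ≤ N)
    (hT0 : 0 ≤ T) (hT : T < max W H) : ¬ pvGood N W H T := by
  unfold pvGood
  rcases le_or_gt W H with h | h
  · have : PySem.Int.floordiv T H = 0 := pv_fdiv_eq_zero hH hT0 (by omega)
    rw [this]; omega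
  · have : PySem.Int.floordiv T W = 0 := pv_fdiv_eq_zero hW hT0 (by omega)
    rw [this]; omega

lemma pvCeil_le {N r d : Int} (hr : 0 < r) (h : N ≤ d * r) : pvCeil N r ≤ d := by
  unfold pvCeil
  have : -d ≤ PySem.Int.floordiv (-N) r := pv_fdiv_ge hr (by linarith)
  omega

lemma pv_le_mul_ceil {N r : Int} (hr : 0 < r) : N ≤ r * pvCeil N r := by
  unfold pvCeil
  have := pv_fdiv_mul_le hr (-N)
  nlinarith

lemma pvCeil_pos {N r : Int} (hr : 0 < r) (hN : 1 ≤ N) : 1 ≤ pvCeil N r := by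
  by_contra h
  have h1 : pvCeil N r ≤ 0 := by omega
  have := pv_le_mul_ceil (N := N) hr
  nlinarith

-- the binary search returns the least S ≥ max(W,H) satisfying pvGood
lemma pvAloop_spec {N W H : Int} (hW : 0 < W) (hH : 0 < H) :
    ∀ (n : Nat) (left right : Int), (right - left).toNat ≤ n → 1 ≤ left → left ≤ right →
      pvGood N W H right → (∀ T, 1 ≤ T → T < left → ¬ pvGood N W H T) →
      (left ≤ pvAloop N W H left right ∧ pvAloop N W H left right ≤ right ∧
        pvGood N W H (pvAloop N W H left right) ∧
        ∀ T, 1 ≤ T → T < pvAloop N W H left right → ¬ pvGood N W H T) := by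
  intro n
  induction n with
  | zero =>
    intro left right hn h1 hlr hg hb
    have : left = right := by omega
    rw [pvAloop]
    simp only [this, lt_irrefl, if_false]
    subst this
    exact ⟨le_rfl, le_rfl, hg, hb⟩
  | succ n ih =>
    intro left right hn h1 hlr hg hb
    rw [pvAloop]
    by_cases hlt : left < right
    · simp only [hlt, if_true]
      have hm1 : left ≤ PySem.Int.floordiv (left + right) 2 :=
        (PySem.Int.le_floordiv_iff_mul_le (a := left + right) (b := 2) (q := left) (by norm_num)).mpr (by omega)
      have hm2 : PySem.Int.floordiv (left + right) 2 < right :=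
        (PySem.Int.floordiv_lt_iff_lt_mul (a := left + right) (b := 2) (q := right) (by norm_num)).mpr (by omega)
      set mid := PySem.Int.floordiv (left + right) 2 with hmid
      by_cases hp : N ≤ PySem.Int.floordiv mid W * PySem.Int.floordiv mid H
      · simp only [hp, if_true]
        have := ih left mid (by omega) h1 (by omega) hp hb
        exact ⟨this.1, by omega, this.2.2⟩
      · simp only [hp, if_false]
        have hb' : ∀ T, 1 ≤ T → T < mid + 1 → ¬ pvGood N W H T := by
          intro T hT1 hTm hgT
          rcases lt_or_ge T left with h | h
          · exact hb T hT1 h hgT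
          · exact hp (pvGood_mono hW hH (by omega) (by omega) hgT)
        have := ih (mid + 1) right (by omega) (by omega) (by omega) hg hb'
        exact ⟨by omega, this.2.1, this.2.2⟩
    · simp only [hlt, if_false]
      have : left = right := by omega
      subst this
      exact ⟨le_rfl, le_rfl, hg, hb⟩

lemma pvKloop_spec {N : Int} :
    ∀ (n : Nat) (K : Int), (N - K).toNat ≤ n → 1 ≤ K →
      1 ≤ pvKloop N K ∧ N ≤ pvKloop N K * pvKloop N K := by
  intro n
  induction n with
  | zero =>
    intro K hn h1
    rw [pvKloop]
    have hNK : N ≤ K := by omega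
    have : ¬ K * K < N := by nlinarith
    simp only [this, if_false]
    omega
  | succ n ih =>
    intro K hn h1
    rw [pvKloop]
    by_cases h : K * K < N
    · simp only [h, if_true]
      have hKN : K < N := by nlinarith
      exact ih (K + 1) (by omega) (by omega)
    · simp only [h, if_false]
      omega

-- fold-of-min lemmas for B's candidate loop
lemma pv_foldl_min3_le_init (f g : Int → Int) :
    ∀ (l : List Int) (acc : Int),
      l.foldl (fun b r => min (min b (f r)) (g r)) acc ≤ acc := by
  intro l
  induction l with
  | nil => intro acc; simp
  | cons x xs ih =>
    intro acc
    simp only [List.foldl_cons]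
    have := ih (min (min acc (f x)) (g x))
    omega

lemma pv_foldl_min3_le_mem (f g : Int → Int) :
    ∀ (l : List Int) (acc r : Int), r ∈ l →
      l.foldl (fun b r => min (min b (f r)) (g r)) acc ≤ min (f r) (g r) := by
  intro l
  induction l with
  | nil => intro acc r h; simp at h
  | cons x xs ih =>
    intro acc r h
    simp only [List.foldl_cons]
    rcases List.mem_cons.mp h with h | h
    · subst h
      have := pv_foldl_min3_le_init f g xs (min (min acc (f r)) (g r))
      omega
    · exact ih _ r h

lemma pv_le_foldl_min3 (f g : Int → Int) :
    ∀ (l : List Int) (acc b : Int), b ≤ acc → (∀ r ∈ l, b ≤ f r ∧ b ≤ g r) →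
      b ≤ l.foldl (fun b r => min (min b (f r)) (g r)) acc := by
  intro l
  induction l with
  | nil => intro acc b h _; simpa using h
  | cons x xs ih =>
    intro acc b hacc hall
    simp only [List.foldl_cons]
    have hx := hall x (List.mem_cons_self ..)
    exact ih _ b (by omega) (fun r hr => hall r (List.mem_cons_of_mem _ hr))

-- the top board side N * max(W,H) satisfies pvGood (it is A's right endpoint and B's fold seed)
lemma pv_good_top {N W H : Int} (hW : 0 < W) (hH : 0 < H) (hN : 1 ≤ N) :
    pvGood N W H (N * max W H) := by
  have h1 : N ≤ PySem.Int.floordiv (N * max W H) W :=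
    pv_fdiv_ge hW (by nlinarith [le_max_left W H])
  have h2 : (1 : Int) ≤ PySem.Int.floordiv (N * max W H) H :=
    pv_fdiv_ge hH (by nlinarith [le_max_right W H])
  exact (by nlinarith : N ≤ N * 1).trans (mul_le_mul h1 h2 (by omega) (by omega))

-- ===== VERDICT helper: the main equivalence =====
lemma pv_main {N W H : Int} (hW : 1 ≤ W) (hH : 1 ≤ H) :
    min_board_size N W H = min_board_size_alt N W H := by
  have hW0 : 0 < W := hW
  have hH0 : 0 < H := hH
  by_cases hN : N ≤ 1
  · -- trivial region: A's loop never runs, B's early return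
    unfold min_board_size min_board_size_alt
    rw [pvAloop]
    have : ¬ max W H < max W H * N := by nlinarith [le_max_left W H, le_max_right W H]
    simp [this, hN]
  · have hN1 : 1 ≤ N := by omega
    -- A returns the least good side S*
    have htop : pvGood N W H (N * max W H) := pv_good_top hW0 hH0 hN1
    have hAs := pvAloop_spec hW0 hH0 (max W H * N - max W H).toNat (max W H) (max W H * N)
      (by omega) (by omega) (by nlinarith [le_max_left W H])
      (by rw [mul_comm]; exact htop)
      (fun T hT1 hT2 => pv_not_good_below hW0 hH0 hN1 (by omega) hT2)
    set S := pvAloop N W H (max W H) (max W H * N) with hSdef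
    obtain ⟨hSlo, hShi, hSgood, hSleast⟩ := hAs
    have hS1 : (1 : Int) ≤ S := by omega
    -- least characterisation: any good side ≥ max(W,H) is ≥ S
    have hleast : ∀ x, max W H ≤ x → pvGood N W H x → S ≤ x := by
      intro x hx hgx
      by_contra h
      exact hSleast x (by omega) (by omega) hgx
    -- K from B's while loop
    have hK := pvKloop_spec (N := N) (N - 1).toNat 1 (by omega) le_rfl
    set K := pvKloop N 1 with hKdef
    obtain ⟨hK1, hKN⟩ := hK
    set f : Int → Int := fun r => max (r * W) (pvCeil N r * H) with hf
    set g : Int → Int := fun r => max (pvCeil N r * W) (r * H) with hg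
    have halt : min_board_size_alt N W H
        = (PySem.List.pyRange 1 (K + 1) 1).foldl
            (fun b r => min (min b (f r)) (g r)) (N * max W H) := by
      simp only [hf, hg]
      unfold min_board_size_alt
      rw [if_neg (by omega : ¬ N ≤ 1), hKdef]
    have hA : min_board_size N W H = S := by rw [hSdef]; rfl
    rw [hA, halt]
    -- every candidate is a good side ≥ max(W,H), hence ≥ S; so the fold stays ≥ S
    have hcands : ∀ r ∈ PySem.List.pyRange 1 (K + 1) 1, S ≤ f r ∧ S ≤ g r := by
      intro r hr
      have hr1 : 1 ≤ r := ((PySem.List.mem_pyRange_one).mp hr).1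
      have hc1 : 1 ≤ pvCeil N r := pvCeil_pos hr1 hN1
      have hrc : N ≤ r * pvCeil N r := pv_le_mul_ceil hr1
      constructor
      · refine hleast _ ?_ (pvGood_candidate hW0 hH0 hr1 hc1 hrc)
        have ha : W ≤ r * W := by nlinarith
        have hb2 : H ≤ pvCeil N r * H := by nlinarith
        simp only [hf, max_le_iff, le_max_iff]
        omega
      · refine hleast _ ?_ (pvGood_candidate hW0 hH0 hc1 hr1 (by nlinarith))
        have ha : W ≤ pvCeil N r * W := by nlinarith
        have hb2 : H ≤ r * H := by nlinarith
        simp only [hg, max_le_iff, le_max_iff]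
        omega
    have hge : S ≤ (PySem.List.pyRange 1 (K + 1) 1).foldl
        (fun b r => min (min b (f r)) (g r)) (N * max W H) :=
      pv_le_foldl_min3 f g _ _ S
        (hleast _ (by nlinarith [le_max_left W H, le_max_right W H]) htop) hcands
    -- one enumerated candidate is ≤ S, so the fold is ≤ S
    set r0 := PySem.Int.floordiv S W with hr0
    set c0 := PySem.Int.floordiv S H with hc0
    have hr01 : 1 ≤ r0 := pv_fdiv_ge hW0 (by nlinarith [le_max_left W H])
    have hc01 : 1 ≤ c0 := pv_fdiv_ge hH0 (by nlinarith [le_max_right W H])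
    have hr0W : r0 * W ≤ S := pv_fdiv_mul_le hW0 S
    have hc0H : c0 * H ≤ S := pv_fdiv_mul_le hH0 S
    have hr0c0 : N ≤ r0 * c0 := hSgood
    have hle : (PySem.List.pyRange 1 (K + 1) 1).foldl
        (fun b r => min (min b (f r)) (g r)) (N * max W H) ≤ S := by
      rcases le_or_gt r0 K with hcase | hcase
      · -- use candidate f r0
        have hmem : r0 ∈ PySem.List.pyRange 1 (K + 1) 1 :=
          (PySem.List.mem_pyRange_one).mpr ⟨hr01, by omega⟩
        have := pv_foldl_min3_le_mem f g _ (N * max W H) r0 hmem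
        have hfr0 : f r0 ≤ S := by
          have h1 : pvCeil N r0 ≤ c0 := pvCeil_le hr01 (by nlinarith)
          simp only [hf, max_le_iff]
          constructor
          · exact hr0W
          · nlinarith
        omega
      rcases le_or_gt c0 K with hcase2 | hcase2
      · -- use candidate g c0
        have hmem : c0 ∈ PySem.List.pyRange 1 (K + 1) 1 :=
          (PySem.List.mem_pyRange_one).mpr ⟨hc01, by omega⟩
        have := pv_foldl_min3_le_mem f g _ (N * max W H) c0 hmem
        have hgc0 : g c0 ≤ S := by
          have h1 : pvCeil N c0 ≤ r0 := pvCeil_le hc01 (by nlinarith)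
          simp only [hg, max_le_iff]
          constructor
          · nlinarith
          · exact hc0H
        omega
      · -- r0 > K and c0 > K: use candidate f K
        have hmem : K ∈ PySem.List.pyRange 1 (K + 1) 1 :=
          (PySem.List.mem_pyRange_one).mpr ⟨hK1, by omega⟩
        have := pv_foldl_min3_le_mem f g _ (N * max W H) K hmem
        have hfK : f K ≤ S := by
          have h1 : pvCeil N K ≤ K := pvCeil_le hK1 (by nlinarith)
          simp only [hf, max_le_iff]
          constructor
          · nlinarith
          · nlinarith
        omega
    omega

-- ===== VERDICT (by name: the statement is the Claim_ definition above) =====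
theorem min_board_size_spec : Claim_equal_min_board_size := by
  intro N W H _ hpre
  unfold Spec_min_board_size
  rcases hpre with ⟨hW, hH⟩ | ⟨hN, hWH⟩
  · exact pv_main hW hH
  · -- N ≤ 1 with a positive dimension: A's loop never runs, B's early return; both give max W H
    have hmax : 1 ≤ max W H := by
      rcases hWH with h | h
      · exact h.trans (le_max_left W H)
      · exact h.trans (le_max_right W H)
    unfold min_board_size min_board_size_alt
    rw [pvAloop]
    have hnr : ¬ max W H < max W H * N := by nlinarith
    simp [hnr, hN]
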